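-- pv_equiv track=rewrite | github.com/Dan-Research-Group/jonas-exam-gen | Spring_2014_12/server.py | mystery1
-- ===== SOURCE A (Python) =====
-- def mystery1(L , multiplier):
--     DB = {}
--     for word in L:
--         if word in DB:
--             DB[word] = DB[word] + multiplier
--         else:
--             DB[word] = 1
--     return DB
-- ===== SOURCE B (Python) =====
-- from collections import Counter
--
-- def mystery1(L, multiplier):
--     c = Counter(L)
--     return {w: 1 + (n - 1) * multiplier for w, n in c.items()}
-- ===== Notes on version B (the rewrite author's own statement) =====
-- stated objective: idiomatic
-- what changed: Replaces A's single-pass incremental dict update (set to 1 on first sight, add multiplier afterwards) by a two-phase count-then-compute: Counter(L) followed by the closed form 1 + (n-1)*multiplier per distinct word.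
import Mathlib
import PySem

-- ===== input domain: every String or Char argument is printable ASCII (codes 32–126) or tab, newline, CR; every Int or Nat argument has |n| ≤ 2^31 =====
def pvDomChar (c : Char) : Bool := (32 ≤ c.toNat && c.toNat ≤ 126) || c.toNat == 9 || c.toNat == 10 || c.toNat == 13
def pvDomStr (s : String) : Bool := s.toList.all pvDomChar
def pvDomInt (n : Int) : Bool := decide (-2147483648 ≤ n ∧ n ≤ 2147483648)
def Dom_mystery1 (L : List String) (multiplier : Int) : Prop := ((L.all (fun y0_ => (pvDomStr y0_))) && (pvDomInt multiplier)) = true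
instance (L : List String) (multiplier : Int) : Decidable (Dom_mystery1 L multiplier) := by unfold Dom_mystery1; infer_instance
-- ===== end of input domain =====

-- B replaces A's single-pass incremental dict update by count-then-compute (Counter + closed form 1+(n-1)*multiplier); same cost, more idiomatic.

-- ===== PORT A =====
def mystery1 (L : List String) (multiplier : Int) : List (String × Int) :=
  (L.foldl
    (fun DB word =>
      if DB.contains word then DB.insert word (DB.getD word 0 + multiplier)
      else DB.insert word 1)
    PySem.Dict.empty).items

-- ===== PORT B =====
def mystery1_alt (L : List String) (multiplier : Int) : List (String × Int) :=
  (PySem.Dict.counter L).items.map (fun p => (p.1, 1 + (p.2 - 1) * multiplier))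

-- ===== PRECONDITION & SPEC =====
def Spec_mystery1 (L : List String) (multiplier : Int) (out : List (String × Int)) : Prop := out = mystery1_alt L multiplier
instance (L : List String) (multiplier : Int) (out : List (String × Int)) : Decidable (Spec_mystery1 L multiplier out) := by unfold Spec_mystery1; infer_instance

-- ===== CLAIM (what is proved, stated in full; the proofs are below) =====
def Claim_equal_mystery1 : Prop := ∀ (L : List String) (multiplier : Int), Dom_mystery1 L multiplier → Spec_mystery1 L multiplier (mystery1 L multiplier)

-- ===== LEMMAS AND PROOFS =====

-- A's loop step, abstracted.
def aStep (m : Int) (DB : PySem.Dict String Int) (word : String) : PySem.Dict String Int :=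
  if DB.contains word then DB.insert word (DB.getD word 0 + m) else DB.insert word 1

theorem aStep_contains (m : Int) (d : PySem.Dict String Int) (w k : String)
    (h : d.contains k = true) : (aStep m d w).contains k = true := by
  unfold aStep
  split_ifs <;> simp [PySem.Dict.contains_insert, h]

theorem afold_getD_of_contains (m : Int) (L : List String) (d : PySem.Dict String Int)
    (k : String) (h : d.contains k = true) :
    (L.foldl (aStep m) d).getD k 0 = d.getD k 0 + (L.count k : Int) * m := by
  induction L generalizing d with
  | nil => simp
  | cons w L ih =>
    simp only [List.foldl_cons]
    rw [ih _ (aStep_contains m d w k h)]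
    by_cases hwk : k = w
    · subst hwk
      unfold aStep
      rw [if_pos h]
      rw [PySem.Dict.getD_insert_self]
      simp
      ring
    · have : (aStep m d w).getD k 0 = d.getD k 0 := by
        unfold aStep
        split_ifs <;> rw [PySem.Dict.getD_insert_of_ne (hne := hwk)]
      rw [this]
      rw [show (w :: L).count k = L.count k from by simp [Ne.symm hwk]]

theorem afold_getD_of_mem (m : Int) (L : List String) (d : PySem.Dict String Int)
    (k : String) (h : d.contains k = false) (hk : k ∈ L) :
    (L.foldl (aStep m) d).getD k 0 = 1 + ((L.count k : Int) - 1) * m := by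
  induction L generalizing d with
  | nil => simp at hk
  | cons w L ih =>
    simp only [List.foldl_cons]
    by_cases hwk : k = w
    · subst hwk
      have hstep : aStep m d k = d.insert k 1 := by
        unfold aStep; rw [if_neg (by simp [h])]
      rw [hstep]
      rw [afold_getD_of_contains m L _ k (PySem.Dict.contains_insert_self _ _ _)]
      rw [PySem.Dict.getD_insert_self]
      simp
    · have hkL : k ∈ L := by
        rcases List.mem_cons.mp hk with h1 | h1
        · exact absurd h1 hwk
        · exact h1
      have hc : (aStep m d w).contains k = false := by
        unfold aStep
        split_ifs <;> simp [PySem.Dict.contains_insert, h, hwk]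
      rw [ih _ hc hkL]
      rw [show (w :: L).count k = L.count k from by simp [Ne.symm hwk]]

theorem afold_keys (m : Int) (L : List String) :
    (L.foldl (aStep m) PySem.Dict.empty).keys = PySem.Set.ofList L := by
  unfold aStep
  have : ∀ d : PySem.Dict String Int,
      (L.foldl (fun DB word => if DB.contains word then DB.insert word (DB.getD word 0 + m)
        else DB.insert word 1) d) =
      (L.foldl (fun DB word => DB.insert word
        (if DB.contains word then DB.getD word 0 + m else 1)) d) := by
    intro d
    induction L generalizing d with
    | nil => rfl
    | cons w L ih =>
      simp only [List.foldl_cons]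
      rw [ih]
      congr 1
      split_ifs <;> rfl
  rw [this]
  rw [PySem.Dict.keys_foldl_insert]
  simp [PySem.Set.update_nil_left, PySem.Dict.keys_empty]

theorem afold_nodup (m : Int) (L : List String) :
    (L.foldl (aStep m) PySem.Dict.empty).keys.Nodup := by
  rw [afold_keys]
  exact PySem.Set.nodup_ofList L

-- ===== VERDICT (by name: the statement is the Claim_ definition above) =====
theorem mystery1_spec : Claim_equal_mystery1 := by
  intro L m _
  show mystery1 L m = mystery1_alt L m
  unfold mystery1 mystery1_alt
  have hA : (L.foldl (fun DB word =>
      if DB.contains word then DB.insert word (DB.getD word 0 + m)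
      else DB.insert word 1) PySem.Dict.empty) = L.foldl (aStep m) PySem.Dict.empty := rfl
  rw [hA]
  rw [PySem.Dict.items_eq_map_keys _ (afold_nodup m L) 0]
  rw [afold_keys, PySem.Dict.items_counter]
  rw [List.map_map]
  apply List.map_congr_left
  intro k hk
  have hkL : k ∈ L := (PySem.Set.mem_ofList L k).mp hk
  simp only [Function.comp]
  rw [afold_getD_of_mem m L PySem.Dict.empty k (PySem.Dict.contains_empty k) hkL]
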